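-- pv_equiv track=rewrite | github.com/LordAizen1/cipherlens | backend/scripts/generate_dataset_v4.py | _lucifer_f
-- ===== SOURCE A (Python) =====
-- _LUCIFER_S0 = [12, 15,  7, 10, 14, 13, 11,  0,  2,  6,  3,  1,  9,  4,  5,  8]
--
-- _LUCIFER_S1 = [ 7,  2, 14,  9,  3, 11,  0,  4, 12, 13,  1, 10,  6, 15,  8,  5]
--
-- def _lucifer_f(half: int, subkey: int) -> int:
--     """Lucifer round function: S-boxes + key mixing on 32-bit half."""
--     x = half ^ subkey
--     out = 0
--     for i in range(8):
--         nibble = (x >> (i * 4)) & 0xF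
--         s = _LUCIFER_S0[nibble] if (i % 2 == 0) else _LUCIFER_S1[nibble]
--         out |= (s << (i * 4))
--     # Simple diffusion: rotate left 13
--     out = ((out << 13) | (out >> 19)) & 0xFFFFFFFF
--     return out
-- ===== SOURCE B (Python) =====
-- _LUCIFER_S0 = [12, 15,  7, 10, 14, 13, 11,  0,  2,  6,  3,  1,  9,  4,  5,  8]
--
-- _LUCIFER_S1 = [ 7,  2, 14,  9,  3, 11,  0,  4, 12, 13,  1, 10,  6, 15,  8,  5]
--
-- # Precomputed byte-level S-box: each byte of x holds an even-index nibble (low,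
-- # through S0) and an odd-index nibble (high, through S1), so one 256-entry table
-- # substitutes both nibbles of a byte at once.
-- _BYTE_SBOX = [_LUCIFER_S0[v & 0xF] | (_LUCIFER_S1[v >> 4] << 4) for v in range(256)]
--
--
-- def _lucifer_f(half: int, subkey: int) -> int:
--     """Lucifer round function: S-boxes + key mixing on 32-bit half."""
--     x = half ^ subkey
--     out = 0
--     for b in range(4):
--         out |= _BYTE_SBOX[(x >> (b * 8)) & 0xFF] << (b * 8)
--     # Simple diffusion: rotate left 13
--     return ((out << 13) | (out >> 19)) & 0xFFFFFFFF
-- ===== Notes on version B (the rewrite author's own statement) =====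
-- stated objective: alternative
-- what changed: Replaces the 8-iteration nibble-by-nibble S-box loop with a precomputed 256-entry byte-level S-box table and a 4-iteration byte loop (each table entry packs an S0 low nibble with an S1 high nibble).
import Mathlib
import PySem

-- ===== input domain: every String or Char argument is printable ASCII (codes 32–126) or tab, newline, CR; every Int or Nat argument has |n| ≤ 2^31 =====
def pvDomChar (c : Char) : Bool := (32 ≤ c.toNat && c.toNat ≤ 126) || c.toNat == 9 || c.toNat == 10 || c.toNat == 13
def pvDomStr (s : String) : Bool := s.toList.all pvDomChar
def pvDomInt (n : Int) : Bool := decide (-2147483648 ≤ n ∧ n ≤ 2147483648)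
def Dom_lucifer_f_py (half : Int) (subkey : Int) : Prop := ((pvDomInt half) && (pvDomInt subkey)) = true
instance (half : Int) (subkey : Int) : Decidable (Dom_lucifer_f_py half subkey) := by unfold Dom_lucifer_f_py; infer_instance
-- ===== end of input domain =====

-- B replaces the 8-iteration nibble loop by a precomputed 256-entry byte-level
-- S-box table and a 4-iteration byte loop (alternative decomposition, same result).


-- ===== PORT A =====
def luciferS0 : List Int := [12, 15, 7, 10, 14, 13, 11, 0, 2, 6, 3, 1, 9, 4, 5, 8]

def luciferS1 : List Int := [7, 2, 14, 9, 3, 11, 0, 4, 12, 13, 1, 10, 6, 15, 8, 5]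

def lucifer_f_py (half : Int) (subkey : Int) : Int :=
  let x := PySem.Int.bxor half subkey
  let out := (PySem.List.pyRange 0 8 1).foldl (fun out i =>
    let k : Nat := (i * 4).toNat
    let nibble := PySem.Int.band (x >>> k) 15
    let s := if PySem.Int.mod i 2 = 0
             then (PySem.List.pyGet? luciferS0 nibble).getD 0
             else (PySem.List.pyGet? luciferS1 nibble).getD 0
    PySem.Int.bor out (s <<< k)) 0
  PySem.Int.band (PySem.Int.bor (out <<< (13:Nat)) (out >>> (19:Nat))) 4294967295

-- ===== PORT B =====
def luciferByteSbox : List Int :=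
  (PySem.List.pyRange 0 256 1).map (fun v =>
    PySem.Int.bor ((PySem.List.pyGet? luciferS0 (PySem.Int.band v 15)).getD 0)
      (((PySem.List.pyGet? luciferS1 (v >>> (4:Nat))).getD 0) <<< (4:Nat)))

def lucifer_f_py_alt (half : Int) (subkey : Int) : Int :=
  let x := PySem.Int.bxor half subkey
  let out := (PySem.List.pyRange 0 4 1).foldl (fun out b =>
    let k : Nat := (b * 8).toNat
    PySem.Int.bor out
      (((PySem.List.pyGet? luciferByteSbox (PySem.Int.band (x >>> k) 255)).getD 0)
        <<< k)) 0
  PySem.Int.band (PySem.Int.bor (out <<< (13:Nat)) (out >>> (19:Nat))) 4294967295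

-- ===== PRECONDITION & SPEC =====
def Spec_lucifer_f_py (half : Int) (subkey : Int) (out : Int) : Prop := out = lucifer_f_py_alt half subkey
instance (half : Int) (subkey : Int) (out : Int) : Decidable (Spec_lucifer_f_py half subkey out) := by unfold Spec_lucifer_f_py; infer_instance

-- ===== CLAIM (what is proved, stated in full; the proofs are below) =====
def Claim_equal_lucifer_f_py : Prop := ∀ (half : Int) (subkey : Int), Dom_lucifer_f_py half subkey → Spec_lucifer_f_py half subkey (lucifer_f_py half subkey)

-- ===== LEMMAS AND PROOFS =====

-- Nat-level views of the tables
def s0v (n : Nat) : Nat := [12, 15, 7, 10, 14, 13, 11, 0, 2, 6, 3, 1, 9, 4, 5, 8].getD n 0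
def s1v (n : Nat) : Nat := [7, 2, 14, 9, 3, 11, 0, 4, 12, 13, 1, 10, 6, 15, 8, 5].getD n 0
def tv (v : Nat) : Nat := s0v (v % 16) ||| (s1v (v / 16)) <<< 4

theorem pv_shl_or (a b k : Nat) : (a ||| b) <<< k = (a <<< k) ||| (b <<< k) := by
  apply Nat.eq_of_testBit_eq; intro i
  simp [Nat.testBit_shiftLeft, Bool.and_or_distrib_left]

theorem pv_band16 (a : Int) : PySem.Int.band a 15 = ((a % 16).toNat : Int) := by
  unfold PySem.Int.band
  split_ifs with h h2 h2 <;> norm_num at * <;> try omega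
  · rw [show ((15:Int).toNat) = 2 ^ 4 - 1 from rfl, Nat.and_two_pow_sub_one_eq_mod]
    omega
  · rw [show ((15:Int).toNat) = 2 ^ 4 - 1 from rfl, Nat.land_comm,
        Nat.and_two_pow_sub_one_eq_mod]
    omega

theorem pv_band256 (a : Int) : PySem.Int.band a 255 = ((a % 256).toNat : Int) := by
  unfold PySem.Int.band
  split_ifs with h h2 h2 <;> norm_num at * <;> try omega
  · rw [show ((255:Int).toNat) = 2 ^ 8 - 1 from rfl, Nat.and_two_pow_sub_one_eq_mod]
    omega
  · rw [show ((255:Int).toNat) = 2 ^ 8 - 1 from rfl, Nat.land_comm,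
        Nat.and_two_pow_sub_one_eq_mod]
    omega

theorem pv_shr_split (x : Int) (k : Nat) : x >>> (k + 4) = (x >>> k) / 16 := by
  rw [Int.shiftRight_eq_div_pow, Int.shiftRight_eq_div_pow,
      Int.ediv_ediv_of_nonneg (by positivity)]
  congr 1
  push_cast [pow_add]
  norm_num

theorem pv_s0_table : luciferS0 = (List.range 16).map (fun n => (s0v n : Int)) := by decide

theorem pv_s1_table : luciferS1 = (List.range 16).map (fun n => (s1v n : Int)) := by decide

set_option maxRecDepth 40000 in
theorem pv_t_table : luciferByteSbox = (List.range 256).map (fun v => (tv v : Int)) := by decide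

theorem pv_getS0 (n : Nat) (h : n < 16) :
    (PySem.List.pyGet? luciferS0 (n : Int)).getD 0 = ((s0v n : Nat) : Int) := by
  rw [PySem.List.pyGet?_natCast, pv_s0_table]
  simp [h]

theorem pv_getS1 (n : Nat) (h : n < 16) :
    (PySem.List.pyGet? luciferS1 (n : Int)).getD 0 = ((s1v n : Nat) : Int) := by
  rw [PySem.List.pyGet?_natCast, pv_s1_table]
  simp [h]

theorem pv_getT (n : Nat) (h : n < 256) :
    (PySem.List.pyGet? luciferByteSbox (n : Int)).getD 0 = ((tv n : Nat) : Int) := by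
  rw [PySem.List.pyGet?_natCast, pv_t_table]
  simp [h]

theorem pv_nib_lo (x : Int) (k : Nat) :
    PySem.Int.band (x >>> k) 15 = ((((x >>> k) % 256).toNat % 16 : Nat) : Int) := by
  rw [pv_band16]; congr 1; omega

theorem pv_nib_hi (x : Int) (k : Nat) :
    PySem.Int.band (x >>> (k + 4)) 15 = ((((x >>> k) % 256).toNat / 16 : Nat) : Int) := by
  rw [pv_shr_split, pv_band16]; congr 1; omega

theorem pv_byte_eq (x : Int) (k : Nat) :
    PySem.Int.band (x >>> k) 255 = ((((x >>> k) % 256).toNat : Nat) : Int) := pv_band256 _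

theorem pv_bor_zero_left (a : Int) : PySem.Int.bor 0 a = a := by
  rw [PySem.Int.bor_comm, PySem.Int.bor_zero]

theorem pv_core (x : Int) :
    (PySem.List.pyRange 0 8 1).foldl (fun out i =>
      let k : Nat := (i * 4).toNat
      let nibble := PySem.Int.band (x >>> k) 15
      let s := if PySem.Int.mod i 2 = 0
               then (PySem.List.pyGet? luciferS0 nibble).getD 0
               else (PySem.List.pyGet? luciferS1 nibble).getD 0
      PySem.Int.bor out (s <<< k)) 0 =
    (PySem.List.pyRange 0 4 1).foldl (fun out b =>
      let k : Nat := (b * 8).toNat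
      PySem.Int.bor out
        (((PySem.List.pyGet? luciferByteSbox (PySem.Int.band (x >>> k) 255)).getD 0)
          <<< k)) 0 := by
  rw [show PySem.List.pyRange 0 8 1 = ([0,1,2,3,4,5,6,7] : List Int) from by decide,
      show PySem.List.pyRange 0 4 1 = ([0,1,2,3] : List Int) from by decide]
  simp only [List.foldl_cons, List.foldl_nil]
  norm_num [show PySem.Int.mod 0 2 = 0 from by decide, show PySem.Int.mod 1 2 = 1 from by decide, show PySem.Int.mod 2 2 = 0 from by decide, show PySem.Int.mod 3 2 = 1 from by decide, show PySem.Int.mod 4 2 = 0 from by decide, show PySem.Int.mod 5 2 = 1 from by decide, show PySem.Int.mod 6 2 = 0 from by decide, show PySem.Int.mod 7 2 = 1 from by decide, show Int.toNat 0 = 0 from rfl, show Int.toNat 4 = 4 from rfl, show Int.toNat 8 = 8 from rfl, show Int.toNat 12 = 12 from rfl, show Int.toNat 16 = 16 from rfl, show Int.toNat 20 = 20 from rfl, show Int.toNat 24 = 24 from rfl, show Int.toNat 28 = 28 from rfl]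
  rw [pv_bor_zero_left, pv_bor_zero_left]
  rw [show PySem.Int.band x 15 = (((x % 256).toNat % 16 : Nat) : Int) from by
        simpa using pv_nib_lo x 0,
      show PySem.Int.band x 255 = (((x % 256).toNat : Nat) : Int) from by
        simpa using pv_byte_eq x 0,
      show PySem.Int.band (x >>> (4:Nat)) 15 = (((x % 256).toNat / 16 : Nat) : Int) from by
        simpa using pv_nib_hi x 0,
      pv_nib_lo x 8, pv_nib_lo x 16, pv_nib_lo x 24,
      show PySem.Int.band (x >>> (12:Nat)) 15 = ((((x >>> (8:Nat)) % 256).toNat / 16 : Nat) : Int) from by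
        simpa using pv_nib_hi x 8,
      show PySem.Int.band (x >>> (20:Nat)) 15 = ((((x >>> (16:Nat)) % 256).toNat / 16 : Nat) : Int) from by
        simpa using pv_nib_hi x 16,
      show PySem.Int.band (x >>> (28:Nat)) 15 = ((((x >>> (24:Nat)) % 256).toNat / 16 : Nat) : Int) from by
        simpa using pv_nib_hi x 24,
      pv_byte_eq x 8, pv_byte_eq x 16, pv_byte_eq x 24]
  rw [pv_getS0 _ (by omega), pv_getS1 _ (by omega), pv_getS0 _ (by omega), pv_getS1 _ (by omega),
      pv_getS0 _ (by omega), pv_getS1 _ (by omega), pv_getS0 _ (by omega), pv_getS1 _ (by omega),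
      pv_getT _ (by omega), pv_getT _ (by omega), pv_getT _ (by omega), pv_getT _ (by omega)]
  simp only [← Int.natCast_shiftLeft, PySem.Int.bor_natCast]
  norm_cast
  simp [tv, pv_shl_or, ← Nat.shiftLeft_add, Nat.lor_assoc]

-- ===== VERDICT (by name: the statement is the Claim_ definition above) =====
theorem lucifer_f_py_spec : Claim_equal_lucifer_f_py := by
  intro half subkey _
  unfold Spec_lucifer_f_py lucifer_f_py lucifer_f_py_alt
  exact congrArg (fun o : Int => PySem.Int.band (PySem.Int.bor (o <<< (13:Nat)) (o >>> (19:Nat))) 4294967295)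
    (pv_core (PySem.Int.bxor half subkey))
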